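-- pv_equiv track=rewrite | github.com/jorgeOmurillo/Python | sorting and searching/nextFib.py | solution
-- ===== SOURCE A (Python) =====
-- import bisect
--
-- def solution(n):
--
--     fib = [0,1]
--
--     for x in range(2,60):
--         fib.append(fib[x-1] + fib[x-2])
--
--     res = []
--
--     for y in n:
--         res.append(fib[bisect.bisect_right(fib, y)])
--
--     return res
-- ===== SOURCE B (Python) =====
-- def solution(n):
--     a, b = 0, 1
--     fib = []
--     for _ in range(60):
--         fib.append(a)
--         a, b = b, a + b
--     return [fib[sum(1 for f in fib if f <= y)] for y in n]
-- ===== Notes on version B (the rewrite author's own statement) =====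
-- stated objective: simpler
-- what changed: B builds the 60-entry Fibonacci table by a running pair (a,b) instead of back-indexing, and replaces bisect's binary search with a linear count of table entries <= y used as the index.
import Mathlib
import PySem

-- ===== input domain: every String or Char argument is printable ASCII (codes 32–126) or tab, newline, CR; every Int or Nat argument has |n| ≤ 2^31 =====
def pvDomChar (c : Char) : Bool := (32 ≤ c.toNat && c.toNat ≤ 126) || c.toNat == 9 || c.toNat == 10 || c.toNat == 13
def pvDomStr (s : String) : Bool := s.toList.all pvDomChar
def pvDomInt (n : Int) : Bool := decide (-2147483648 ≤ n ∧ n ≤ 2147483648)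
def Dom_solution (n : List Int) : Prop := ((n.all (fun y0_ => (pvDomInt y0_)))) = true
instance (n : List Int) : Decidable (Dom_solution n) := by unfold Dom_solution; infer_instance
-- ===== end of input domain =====

-- B replaces bisect's binary search by a linear count of table entries ≤ y and builds the
-- table with a running pair instead of back-indexing (objective: simpler).
-- On Dom (|y| ≤ 2^31) the looked-up index is always in range, so the `getD … 0` defaults
-- in both ports are never taken and the indexing is exact.

-- ===== PORT A =====
-- hand port of bisect.bisect_right(a, x): the standard 'while lo < hi' binary-search loop;
-- the fuel argument only bounds the iteration count (hi - lo shrinks every turn, so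
-- fuel = initial hi - lo is enough) and makes the recursion structural
def bisLoop (a : List Int) (x : Int) : Nat → Nat → Nat → Nat
  | 0, lo, _ => lo
  | fuel + 1, lo, hi =>
    if lo < hi then
      if x < a.getD ((lo + hi) / 2) 0 then bisLoop a x fuel lo ((lo + hi) / 2)
      else bisLoop a x fuel ((lo + hi) / 2 + 1) hi
    else lo

def bisRight (a : List Int) (x : Int) : Nat := bisLoop a x a.length 0 a.length

def solution (n : List Int) : List Int :=
  let fib := (PySem.List.pyRange 2 60 1).foldl
    (fun f x => f ++ [(PySem.List.pyGet? f (x - 1)).getD 0 + (PySem.List.pyGet? f (x - 2)).getD 0])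
    [0, 1]
  n.foldl (fun res y => res ++ [fib.getD (bisRight fib y) 0]) []

-- ===== PORT B =====
def solution_alt (n : List Int) : List Int :=
  let fib := ((List.range 60).foldl
    (fun (st : List Int × Int × Int) _ => (st.1 ++ [st.2.1], st.2.2, st.2.1 + st.2.2))
    ([], 0, 1)).1
  n.map (fun y => fib.getD (fib.countP (fun f => decide (f ≤ y))) 0)

-- ===== PRECONDITION & SPEC =====
def Spec_solution (n : List Int) (out : List Int) : Prop := out = solution_alt n
instance (n : List Int) (out : List Int) : Decidable (Spec_solution n out) := by unfold Spec_solution; infer_instance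

-- ===== CLAIM (what is proved, stated in full; the proofs are below) =====
def Claim_equal_solution : Prop := ∀ (n : List Int), Dom_solution n → Spec_solution n (solution n)

-- ===== LEMMAS AND PROOFS =====

def fibL : List Int := [0, 1, 1, 2, 3, 5, 8, 13, 21, 34, 55, 89, 144, 233, 377, 610, 987, 1597, 2584, 4181, 6765, 10946, 17711, 28657, 46368, 75025, 121393, 196418, 317811, 514229, 832040, 1346269, 2178309, 3524578, 5702887, 9227465, 14930352, 24157817, 39088169, 63245986, 102334155, 165580141, 267914296, 433494437, 701408733, 1134903170, 1836311903, 2971215073, 4807526976, 7778742049, 12586269025, 20365011074, 32951280099, 53316291173, 86267571272, 139583862445, 225851433717, 365435296162, 591286729879, 956722026041]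

theorem fibA_eq :
    (PySem.List.pyRange 2 60 1).foldl
      (fun f x => f ++ [(PySem.List.pyGet? f (x - 1)).getD 0 + (PySem.List.pyGet? f (x - 2)).getD 0])
      [0, 1] = fibL := by decide

theorem fibB_eq :
    (((List.range 60).foldl
      (fun (st : List Int × Int × Int) _ => (st.1 ++ [st.2.1], st.2.2, st.2.1 + st.2.2))
      ([], 0, 1)).1) = fibL := by decide

theorem fibL_sorted : fibL.Pairwise (· ≤ ·) := List.isChain_iff_pairwise.mp (by decide)

-- for a sorted list, "x is below entry m" ↔ "at most m entries are ≤ x"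
theorem rank_iff (a : List Int) (hs : a.Pairwise (· ≤ ·)) (m : Nat) (hm : m < a.length)
    (x : Int) : x < a.getD m 0 ↔ a.countP (fun f => decide (f ≤ x)) ≤ m := by
  induction a generalizing m with
  | nil => simp at hm
  | cons h t ih =>
    rw [List.pairwise_cons] at hs
    obtain ⟨hh, ht⟩ := hs
    rw [List.countP_cons]
    cases m with
    | zero =>
      simp only [List.getD_cons_zero]
      by_cases hx : h ≤ x
      · have h0 : ¬ x < h := by omega
        simp [hx, h0]
      · have hz : t.countP (fun f => decide (f ≤ x)) = 0 := by
          rw [List.countP_eq_zero]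
          intro b hb
          have := hh b hb
          simp only [decide_eq_true_eq]
          omega
        simp [hx, hz]
        omega
    | succ m =>
      simp only [List.getD_cons_succ]
      have hm' : m < t.length := by simpa using hm
      by_cases hx : h ≤ x
      · rw [ih ht m hm']
        simp [hx]
      · have hz : t.countP (fun f => decide (f ≤ x)) = 0 := by
          rw [List.countP_eq_zero]
          intro b hb
          have := hh b hb
          simp only [decide_eq_true_eq]
          omega
        have hb : h ≤ t.getD m 0 := by
          have : t.getD m 0 = t[m] := List.getD_eq_getElem t 0 hm'
          rw [this]
          exact hh _ (t.getElem_mem hm')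
        have hxlt : x < t.getD m 0 := by omega
        have hg : t.getD m 0 = t[m] := List.getD_eq_getElem t 0 hm'
        simp [hx, hz, List.getElem?_eq_getElem hm']
        omega

-- the binary-search loop returns r whenever the comparisons are governed by rank r
theorem bisLoop_eq (a : List Int) (x : Int) (r : Nat)
    (H : ∀ m, m < a.length → (x < a.getD m 0 ↔ r ≤ m)) :
    ∀ fuel lo hi, hi - lo ≤ fuel → lo ≤ r → r ≤ hi → hi ≤ a.length → bisLoop a x fuel lo hi = r := by
  intro fuel
  induction fuel with
  | zero =>
    intro lo hi hk h1 h2 h3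
    simp only [bisLoop]
    omega
  | succ fuel ih =>
    intro lo hi hk h1 h2 h3
    simp only [bisLoop]
    by_cases hlt : lo < hi
    · rw [if_pos hlt]
      have hiff := H ((lo + hi) / 2) (by omega)
      by_cases hc : x < a.getD ((lo + hi) / 2) 0
      · rw [if_pos hc]
        exact ih lo ((lo + hi) / 2) (by omega) h1 (hiff.mp hc) (by omega)
      · rw [if_neg hc]
        have hr : ¬ r ≤ (lo + hi) / 2 := fun hr => hc (hiff.mpr hr)
        exact ih ((lo + hi) / 2 + 1) hi (by omega) (by omega) h2 h3
    · rw [if_neg hlt]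
      omega

theorem bisRight_eq_countP (y : Int) :
    bisRight fibL y = fibL.countP (fun f => decide (f ≤ y)) := by
  refine bisLoop_eq fibL y _ (fun m hm => rank_iff fibL fibL_sorted m hm y)
    fibL.length 0 fibL.length (by omega) (by omega) ?_ (le_refl _)
  exact List.countP_le_length

-- ===== VERDICT (by name: the statement is the Claim_ definition above) =====
theorem solution_spec : Claim_equal_solution := by
  intro n _
  unfold Spec_solution solution solution_alt
  rw [fibA_eq, fibB_eq]
  rw [PySem.List.foldl_append_singleton_eq_map]
  exact List.map_congr_left (fun y _ => by rw [bisRight_eq_countP])
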